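-- pv_equiv track=rewrite | github.com/josepablocam/janus-public | janus/janus/evaluation/paper_example.py | rule_name_for_paper
-- ===== SOURCE A (Python) =====
-- def rule_name_for_paper(r_str):
--     names = {
--         "ComponentInsert": "CInsert",
--         "ComponentRemove": "CRemove",
--         "ComponentUpdate": "CUpdate",
--         "HyperparamRemove": "HRemove",
--         "HyperparamUpdate": "HUpdate",
--     }
--     for orig, replacement in names.items():
--         r_str = r_str.replace(orig, replacement)
--     return r_str
-- ===== SOURCE B (Python) =====
-- def rule_name_for_paper(r_str):
--     names = {
--         "ComponentInsert": "CInsert",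
--         "ComponentRemove": "CRemove",
--         "ComponentUpdate": "CUpdate",
--         "HyperparamRemove": "HRemove",
--         "HyperparamUpdate": "HUpdate",
--     }
--     out = []
--     i = 0
--     n = len(r_str)
--     while i < n:
--         for key, repl in names.items():
--             if r_str.startswith(key, i):
--                 out.append(repl)
--                 i += len(key)
--                 break
--         else:
--             out.append(r_str[i])
--             i += 1
--     return "".join(out)
-- ===== Notes on version B (the rewrite author's own statement) =====
-- stated objective: alternative
-- what changed: Replaces five sequential full-string replace passes by one left-to-right scan that, at each position, matches the abbreviation table and emits either a replacement or the character.
import Mathlib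
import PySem

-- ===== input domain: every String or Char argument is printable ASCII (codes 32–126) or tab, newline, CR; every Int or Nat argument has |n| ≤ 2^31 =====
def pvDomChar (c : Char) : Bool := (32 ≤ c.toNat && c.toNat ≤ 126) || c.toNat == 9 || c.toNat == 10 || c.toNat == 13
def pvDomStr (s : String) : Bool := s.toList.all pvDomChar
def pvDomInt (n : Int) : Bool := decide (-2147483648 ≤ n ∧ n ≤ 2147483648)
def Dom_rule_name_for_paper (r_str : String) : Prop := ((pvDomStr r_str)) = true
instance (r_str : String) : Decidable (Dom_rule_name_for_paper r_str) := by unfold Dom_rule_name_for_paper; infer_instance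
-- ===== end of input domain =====

-- B replaces A's five sequential full-string replace passes by ONE left-to-right scan that matches
-- the abbreviation table at each position (objective: alternative; equivalence proved below).

-- ===== PORT A =====
-- A's dict literal (distinct keys) ports as its association list in insertion order;
-- the `for orig, replacement in names.items()` loop over it is the foldl.
def pvNames : List (String × String) :=
  [("ComponentInsert", "CInsert"), ("ComponentRemove", "CRemove"), ("ComponentUpdate", "CUpdate"),
   ("HyperparamRemove", "HRemove"), ("HyperparamUpdate", "HUpdate")]

def rule_name_for_paper (r_str : String) : String :=
  pvNames.foldl (fun acc p => PySem.Str.replace acc p.1 p.2) r_str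

-- ===== PORT B =====
-- B's single while-loop scan: at each position try the table keys in order (the for/else),
-- emit the replacement and jump past the key on a hit, else emit the character and advance.
def pvAltGo : List Char → List Char
  | [] => []
  | c :: t =>
    if "ComponentInsert".toList.isPrefixOf (c :: t) then "CInsert".toList ++ pvAltGo (t.drop 14)
    else if "ComponentRemove".toList.isPrefixOf (c :: t) then "CRemove".toList ++ pvAltGo (t.drop 14)
    else if "ComponentUpdate".toList.isPrefixOf (c :: t) then "CUpdate".toList ++ pvAltGo (t.drop 14)
    else if "HyperparamRemove".toList.isPrefixOf (c :: t) then "HRemove".toList ++ pvAltGo (t.drop 15)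
    else if "HyperparamUpdate".toList.isPrefixOf (c :: t) then "HUpdate".toList ++ pvAltGo (t.drop 15)
    else c :: pvAltGo t
termination_by l => l.length
decreasing_by all_goals simp

def rule_name_for_paper_alt (r_str : String) : String :=
  String.ofList (pvAltGo r_str.toList)

-- ===== PRECONDITION & SPEC =====
def Spec_rule_name_for_paper (r_str : String) (out : String) : Prop := out = rule_name_for_paper_alt r_str
instance (r_str : String) (out : String) : Decidable (Spec_rule_name_for_paper r_str out) := by unfold Spec_rule_name_for_paper; infer_instance

-- ===== CLAIM (what is proved, stated in full; the proofs are below) =====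
def Claim_equal_rule_name_for_paper : Prop := ∀ (r_str : String), Dom_rule_name_for_paper r_str → Spec_rule_name_for_paper r_str (rule_name_for_paper r_str)

-- ===== LEMMAS AND PROOFS =====

-- Acc-free recursive form of one `str.replace` pass (proved equal to PySem.Chars.replace below).
def pvRep (old new : List Char) : List Char → List Char
  | [] => []
  | c :: t =>
    if old.isPrefixOf (c :: t) then new ++ pvRep old new (t.drop (old.length - 1))
    else c :: pvRep old new t
termination_by l => l.length
decreasing_by all_goals simp

theorem pvRep_nil (old new : List Char) : pvRep old new [] = [] := by simp [pvRep]

theorem pvRep_not_prefix (old new : List Char) (c : Char) (t : List Char)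
    (h : ¬ old.isPrefixOf (c :: t) = true) :
    pvRep old new (c :: t) = c :: pvRep old new t := by
  rw [pvRep.eq_def]; simp [h]

theorem pvRep_not_prefix' (old new : List Char) (c : Char) (t : List Char)
    (h : ¬ old <+: (c :: t)) :
    pvRep old new (c :: t) = c :: pvRep old new t :=
  pvRep_not_prefix old new c t (by simpa [List.isPrefixOf_iff_prefix] using h)

theorem pvRep_prefix (old new : List Char) (c : Char) (t : List Char)
    (hp : old.isPrefixOf (c :: t) = true) :
    pvRep old new (c :: t) = new ++ pvRep old new (t.drop (old.length - 1)) := by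
  rw [pvRep.eq_def]; simp [hp]

theorem pvRep_self_append (old new t : List Char) (hne : old ≠ []) :
    pvRep old new (old ++ t) = new ++ pvRep old new t := by
  obtain ⟨c, old', rfl⟩ : ∃ c o, old = c :: o := by
    cases old with | nil => exact absurd rfl hne | cons a b => exact ⟨a, b, rfl⟩
  have hp : (c :: old').isPrefixOf (c :: (old' ++ t)) = true := by
    rw [List.isPrefixOf_iff_prefix]; exact ⟨t, by simp⟩
  rw [show (c :: old') ++ t = c :: (old' ++ t) by simp, pvRep_prefix _ _ _ _ hp]
  simp

-- go with enough fuel computes pvRep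
theorem pvGo_eq_pvRep (old new : List Char) (hne : old ≠ []) :
    ∀ fuel l acc, l.length ≤ fuel →
      PySem.Chars.replace.go old new fuel l acc = acc.reverse ++ pvRep old new l := by
  intro fuel
  induction fuel with
  | zero =>
    intro l acc h
    have : l = [] := by cases l with | nil => rfl | cons a b => simp at h
    subst this; rw [PySem.Chars.replace.go]; simp [pvRep_nil]
  | succ n ih =>
    intro l acc h
    cases l with
    | nil =>
      rw [PySem.Chars.replace.go]
      all_goals simp [pvRep_nil]
    | cons c t =>
      have hone : 1 ≤ old.length := by
        cases old with | nil => exact absurd rfl hne | cons a b => simp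
      have hlt : t.length ≤ n := by simp at h; omega
      rw [PySem.Chars.replace.go]
      by_cases hp : old.isPrefixOf (c :: t) = true
      · simp only [hp, if_true]
        have hlen : ((c :: t).drop old.length).length ≤ n := by
          simp only [List.length_drop, List.length_cons]; omega
        have hd : (c :: t).drop old.length = t.drop (old.length - 1) := by
          cases old with | nil => exact absurd rfl hne | cons a b => simp
        rw [ih _ _ hlen, pvRep_prefix _ _ _ _ hp, hd]
        simp
      · simp only [hp]
        rw [ih t (c :: acc) hlt, pvRep_not_prefix _ _ _ _ hp]
        simp

theorem pvReplace_eq_pvRep (s old new : List Char) (hne : old ≠ []) :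
    PySem.Chars.replace s old new = pvRep old new s := by
  have : ¬ old.isEmpty = true := by simpa [List.isEmpty_iff] using hne
  simp only [PySem.Chars.replace, this]
  simpa using pvGo_eq_pvRep old new hne s.length s [] le_rfl

-- a pass walks unchanged through a block r in which old can match at no offset
theorem pvRep_append_skip (old new : List Char) :
    ∀ (r t : List Char),
      (∀ k < r.length, ¬ (r.drop k <+: old) ∧ ¬ (old <+: r.drop k)) →
      pvRep old new (r ++ t) = r ++ pvRep old new t := by
  intro r
  induction r with
  | nil => intro t _; simp
  | cons c r' ih =>
    intro t h
    have hnp : ¬ old.isPrefixOf (c :: (r' ++ t)) = true := by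
      rw [List.isPrefixOf_iff_prefix]
      intro hp
      have hr : (c :: r') <+: (c :: r') ++ t := ⟨t, rfl⟩
      rcases List.prefix_or_prefix_of_prefix (by simpa using hp) hr with h1 | h1
      · exact (h 0 (by simp)).2 (by simpa using h1)
      · exact (h 0 (by simp)).1 (by simpa using h1)
    rw [show (c :: r') ++ t = c :: (r' ++ t) by simp, pvRep_not_prefix _ _ _ _ hnp,
        ih t (fun k hk => by simpa using h (k + 1) (by simpa using Nat.succ_lt_succ hk))]
    simp

-- a pattern-suffix found at the head of a pass's output was already at the head of its input,
-- provided no suffix of the pattern aligns with the replacement text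
theorem pvRep_head_transfer (old new p₀ : List Char)
    (hcond : ∀ m < p₀.length, ¬ (p₀.drop m <+: new) ∧ ¬ (new <+: p₀.drop m)) :
    ∀ (t p : List Char), p <:+ p₀ → p <+: pvRep old new t → p <+: t := by
  intro t
  induction t with
  | nil => intro p _ hp; simpa [pvRep_nil] using hp
  | cons c t' ih =>
    intro p hs hp
    by_cases hpre : old.isPrefixOf (c :: t') = true
    · rw [pvRep] at hp
      simp only [hpre, if_true] at hp
      cases p with
      | nil => exact List.nil_prefix
      | cons a p' =>
        exfalso
        have hnew : new <+: new ++ pvRep old new (t'.drop (old.length - 1)) := ⟨_, rfl⟩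
        have hm : p₀.length - (a :: p').length < p₀.length := by
          have := hs.length_le; simp at this ⊢; omega
        have hdrop : p₀.drop (p₀.length - (a :: p').length) = a :: p' :=
          (List.suffix_iff_eq_drop.mp hs).symm
        rcases List.prefix_or_prefix_of_prefix hp hnew with h1 | h1
        · exact (hcond _ hm).1 (by rw [hdrop]; exact h1)
        · exact (hcond _ hm).2 (by rw [hdrop]; exact h1)
    · rw [pvRep_not_prefix _ _ _ _ hpre] at hp
      cases p with
      | nil => exact List.nil_prefix
      | cons a p' =>
        rw [List.cons_prefix_cons] at hp
        obtain ⟨rfl, hp'⟩ := hp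
        have hs' : p' <:+ p₀ := List.IsSuffix.trans ⟨[a], rfl⟩ hs
        exact List.cons_prefix_cons.mpr ⟨rfl, ih p' hs' hp'⟩

-- corollary: a key that did not match at the head still does not after an earlier pass
theorem pvRep_no_head (old new key : List Char) (c : Char) (t : List Char)
    (hcond : ∀ m < key.length, ¬ (key.drop m <+: new) ∧ ¬ (new <+: key.drop m))
    (h : ¬ key <+: (c :: t)) : ¬ key <+: (c :: pvRep old new t) := by
  intro hk
  cases key with
  | nil => exact h List.nil_prefix
  | cons a k' =>
    rw [List.cons_prefix_cons] at hk
    obtain ⟨rfl, hk'⟩ := hk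
    have hs : k' <:+ a :: k' := ⟨[a], rfl⟩
    exact h (List.cons_prefix_cons.mpr ⟨rfl, pvRep_head_transfer old new (a :: k') hcond t k' hs hk'⟩)

-- the composed five passes, acc-free
def pvComposed (l : List Char) : List Char :=
  pvRep "HyperparamUpdate".toList "HUpdate".toList
    (pvRep "HyperparamRemove".toList "HRemove".toList
      (pvRep "ComponentUpdate".toList "CUpdate".toList
        (pvRep "ComponentRemove".toList "CRemove".toList
          (pvRep "ComponentInsert".toList "CInsert".toList l))))

theorem pvComposed_def (l : List Char) :
    pvRep "HyperparamUpdate".toList "HUpdate".toList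
      (pvRep "HyperparamRemove".toList "HRemove".toList
        (pvRep "ComponentUpdate".toList "CUpdate".toList
          (pvRep "ComponentRemove".toList "CRemove".toList
            (pvRep "ComponentInsert".toList "CInsert".toList l)))) = pvComposed l := rfl

theorem pvMain : ∀ (n : Nat) (l : List Char), l.length ≤ n → pvComposed l = pvAltGo l := by
  intro n
  induction n with
  | zero =>
    intro l h
    have : l = [] := by cases l with | nil => rfl | cons a b => simp at h
    subst this
    simp [pvComposed, pvRep_nil, pvAltGo]
  | succ n ih =>
    intro l h
    cases l with
    | nil => simp [pvComposed, pvRep_nil, pvAltGo]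
    | cons c t =>
      by_cases h1 : "ComponentInsert".toList.isPrefixOf (c :: t) = true
      · obtain ⟨t', ht⟩ := List.isPrefixOf_iff_prefix.mp h1
        rw [pvAltGo]; simp only [h1, if_true]
        have htd : t.drop 14 = t' := by
          have := congrArg (List.drop 15) ht; simpa using this.symm
        rw [← ht, htd]
        unfold pvComposed
        rw [pvRep_self_append _ _ _ (by decide),
            pvRep_append_skip _ _ _ _ (by decide), pvRep_append_skip _ _ _ _ (by decide),
            pvRep_append_skip _ _ _ _ (by decide), pvRep_append_skip _ _ _ _ (by decide)]
        have : t'.length ≤ n := by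
          rw [← ht] at h; simp at h; omega
        rw [pvComposed_def, ih t' this]
      · by_cases h2 : "ComponentRemove".toList.isPrefixOf (c :: t) = true
        · obtain ⟨t', ht⟩ := List.isPrefixOf_iff_prefix.mp h2
          rw [pvAltGo]; simp only [h1, h2, if_true, Bool.false_eq_true, if_false]
          have htd : t.drop 14 = t' := by
            have := congrArg (List.drop 15) ht; simpa using this.symm
          rw [← ht, htd]
          unfold pvComposed
          rw [pvRep_append_skip _ _ _ _ (by decide),
              pvRep_self_append _ _ _ (by decide),
              pvRep_append_skip _ _ _ _ (by decide), pvRep_append_skip _ _ _ _ (by decide),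
              pvRep_append_skip _ _ _ _ (by decide)]
          have hlen : t'.length ≤ n := by rw [← ht] at h; simp at h; omega
          rw [pvComposed_def, ih t' hlen]
        · by_cases h3 : "ComponentUpdate".toList.isPrefixOf (c :: t) = true
          · obtain ⟨t', ht⟩ := List.isPrefixOf_iff_prefix.mp h3
            rw [pvAltGo]; simp only [h1, h2, h3, if_true, Bool.false_eq_true, if_false]
            have htd : t.drop 14 = t' := by
              have := congrArg (List.drop 15) ht; simpa using this.symm
            rw [← ht, htd]
            unfold pvComposed
            rw [pvRep_append_skip _ _ _ _ (by decide), pvRep_append_skip _ _ _ _ (by decide),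
                pvRep_self_append _ _ _ (by decide),
                pvRep_append_skip _ _ _ _ (by decide), pvRep_append_skip _ _ _ _ (by decide)]
            have hlen : t'.length ≤ n := by rw [← ht] at h; simp at h; omega
            rw [pvComposed_def, ih t' hlen]
          · by_cases h4 : "HyperparamRemove".toList.isPrefixOf (c :: t) = true
            · obtain ⟨t', ht⟩ := List.isPrefixOf_iff_prefix.mp h4
              rw [pvAltGo]; simp only [h1, h2, h3, h4, if_true, Bool.false_eq_true, if_false]
              have htd : t.drop 15 = t' := by
                have := congrArg (List.drop 16) ht; simpa using this.symm
              rw [← ht, htd]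
              unfold pvComposed
              rw [pvRep_append_skip _ _ _ _ (by decide), pvRep_append_skip _ _ _ _ (by decide),
                  pvRep_append_skip _ _ _ _ (by decide),
                  pvRep_self_append _ _ _ (by decide),
                  pvRep_append_skip _ _ _ _ (by decide)]
              have hlen : t'.length ≤ n := by rw [← ht] at h; simp at h; omega
              rw [pvComposed_def, ih t' hlen]
            · by_cases h5 : "HyperparamUpdate".toList.isPrefixOf (c :: t) = true
              · obtain ⟨t', ht⟩ := List.isPrefixOf_iff_prefix.mp h5
                rw [pvAltGo]; simp only [h1, h2, h3, h4, h5, if_true, Bool.false_eq_true, if_false]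
                have htd : t.drop 15 = t' := by
                  have := congrArg (List.drop 16) ht; simpa using this.symm
                rw [← ht, htd]
                unfold pvComposed
                rw [pvRep_append_skip _ _ _ _ (by decide), pvRep_append_skip _ _ _ _ (by decide),
                    pvRep_append_skip _ _ _ _ (by decide), pvRep_append_skip _ _ _ _ (by decide),
                    pvRep_self_append _ _ _ (by decide)]
                have hlen : t'.length ≤ n := by rw [← ht] at h; simp at h; omega
                rw [pvComposed_def, ih t' hlen]
              · -- no key matches at the head: every pass keeps the head character
                have hp1 : ¬ "ComponentInsert".toList <+: (c :: t) := fun hp => h1 (List.isPrefixOf_iff_prefix.mpr hp)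
                have hp2 : ¬ "ComponentRemove".toList <+: (c :: t) := fun hp => h2 (List.isPrefixOf_iff_prefix.mpr hp)
                have hp3 : ¬ "ComponentUpdate".toList <+: (c :: t) := fun hp => h3 (List.isPrefixOf_iff_prefix.mpr hp)
                have hp4 : ¬ "HyperparamRemove".toList <+: (c :: t) := fun hp => h4 (List.isPrefixOf_iff_prefix.mpr hp)
                have hp5 : ¬ "HyperparamUpdate".toList <+: (c :: t) := fun hp => h5 (List.isPrefixOf_iff_prefix.mpr hp)
                have H2 : ¬ "ComponentRemove".toList <+:
                    c :: pvRep "ComponentInsert".toList "CInsert".toList t :=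
                  pvRep_no_head _ _ _ c t (by decide) hp2
                have H3 : ¬ "ComponentUpdate".toList <+:
                    c :: pvRep "ComponentRemove".toList "CRemove".toList
                      (pvRep "ComponentInsert".toList "CInsert".toList t) :=
                  pvRep_no_head _ _ _ c _ (by decide) (pvRep_no_head _ _ _ c t (by decide) hp3)
                have H4 : ¬ "HyperparamRemove".toList <+:
                    c :: pvRep "ComponentUpdate".toList "CUpdate".toList
                      (pvRep "ComponentRemove".toList "CRemove".toList
                        (pvRep "ComponentInsert".toList "CInsert".toList t)) :=
                  pvRep_no_head _ _ _ c _ (by decide)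
                    (pvRep_no_head _ _ _ c _ (by decide) (pvRep_no_head _ _ _ c t (by decide) hp4))
                have H5 : ¬ "HyperparamUpdate".toList <+:
                    c :: pvRep "HyperparamRemove".toList "HRemove".toList
                      (pvRep "ComponentUpdate".toList "CUpdate".toList
                        (pvRep "ComponentRemove".toList "CRemove".toList
                          (pvRep "ComponentInsert".toList "CInsert".toList t))) :=
                  pvRep_no_head _ _ _ c _ (by decide)
                    (pvRep_no_head _ _ _ c _ (by decide)
                      (pvRep_no_head _ _ _ c _ (by decide) (pvRep_no_head _ _ _ c t (by decide) hp5)))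
                rw [pvAltGo]; simp only [h1, h2, h3, h4, h5, Bool.false_eq_true, if_false]
                unfold pvComposed
                rw [pvRep_not_prefix' _ _ _ _ hp1, pvRep_not_prefix' _ _ _ _ H2,
                    pvRep_not_prefix' _ _ _ _ H3, pvRep_not_prefix' _ _ _ _ H4,
                    pvRep_not_prefix' _ _ _ _ H5]
                have hlen : t.length ≤ n := by simp at h; omega
                rw [pvComposed_def, ih t hlen]

-- ===== VERDICT (by name: the statement is the Claim_ definition above) =====
theorem rule_name_for_paper_spec : Claim_equal_rule_name_for_paper := by
  intro r _
  unfold Spec_rule_name_for_paper rule_name_for_paper rule_name_for_paper_alt pvNames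
  simp only [List.foldl, PySem.Str.replace, String.toList_ofList]
  rw [pvReplace_eq_pvRep _ _ _ (by decide), pvReplace_eq_pvRep _ _ _ (by decide),
      pvReplace_eq_pvRep _ _ _ (by decide), pvReplace_eq_pvRep _ _ _ (by decide),
      pvReplace_eq_pvRep _ _ _ (by decide)]
  rw [show ∀ l, pvRep "HyperparamUpdate".toList "HUpdate".toList
        (pvRep "HyperparamRemove".toList "HRemove".toList
          (pvRep "ComponentUpdate".toList "CUpdate".toList
            (pvRep "ComponentRemove".toList "CRemove".toList
              (pvRep "ComponentInsert".toList "CInsert".toList l)))) = pvComposed l from fun _ => rfl,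
      pvMain r.toList.length r.toList le_rfl]
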